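-- pv_equiv track=rewrite | github.com/MaahinVPanchal/netmcp | netmcp/mcp-server/tools.py | _is_backend_url
-- ===== SOURCE A (Python) =====
-- def _is_backend_url(url: str) -> bool:
--     """Check if URL looks like a backend/API endpoint."""
--     backend_indicators = [
--         "/api/", "/graphql", "/rest/", "/v1/", "/v2/", "/v3/",
--         "/supabase.co", "/firebase", "/execute-api", "/lambda",
--         "/webhook", "/callback", "/oauth", "/auth/",
--         ".json", ".xml",
--     ]
--     url_lower = url.lower()
--     return any(indicator in url_lower for indicator in backend_indicators)
-- ===== SOURCE B (Python) =====
-- _SLASH_TAILS = (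
--     "api/", "graphql", "rest/", "v1/", "v2/", "v3/",
--     "supabase.co", "firebase", "execute-api", "lambda",
--     "webhook", "callback", "oauth", "auth/",
-- )
--
-- def _is_backend_url(url: str) -> bool:
--     """Check if URL looks like a backend/API endpoint.
--
--     Single left-to-right pass dispatching on the current character: every
--     indicator starts with '/' or '.', so only at those characters do we
--     compare the following text against the indicator tails.
--     """
--     u = url.lower()
--     for i, c in enumerate(u):
--         if c == '/':
--             for t in _SLASH_TAILS:
--                 if u.startswith(t, i + 1):
--                     return True
--         elif c == '.':
--             if u.startswith("json", i + 1) or u.startswith("xml", i + 1):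
--                 return True
--     return False
-- ===== Notes on version B (the rewrite author's own statement) =====
-- stated objective: alternative
-- what changed: A runs 16 independent whole-string substring scans (one 'in' per indicator); B makes one left-to-right pass over the lowered URL, dispatching on the current character ('/' or '.', the only characters an indicator can start with) and comparing the indicator tails only at those positions.
import Mathlib
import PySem

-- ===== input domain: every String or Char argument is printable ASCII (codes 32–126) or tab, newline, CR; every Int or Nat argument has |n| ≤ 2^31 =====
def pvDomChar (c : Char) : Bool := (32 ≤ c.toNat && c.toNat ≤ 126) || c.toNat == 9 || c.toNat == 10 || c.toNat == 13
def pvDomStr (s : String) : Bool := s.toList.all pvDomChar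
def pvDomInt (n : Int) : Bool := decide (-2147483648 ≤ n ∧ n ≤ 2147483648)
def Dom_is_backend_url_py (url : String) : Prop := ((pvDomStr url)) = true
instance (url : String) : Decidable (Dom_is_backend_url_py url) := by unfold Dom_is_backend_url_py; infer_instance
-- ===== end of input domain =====

-- B replaces A's 16 independent substring scans by one left-to-right pass over the
-- lowered URL that dispatches on the current character ('/' or '.') and compares
-- indicator tails only there (alternative traversal, same asymptotic cost).

-- ===== PORT A =====
def pvIndicatorsA : List String :=
  ["/api/", "/graphql", "/rest/", "/v1/", "/v2/", "/v3/",
   "/supabase.co", "/firebase", "/execute-api", "/lambda",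
   "/webhook", "/callback", "/oauth", "/auth/",
   ".json", ".xml"]

def is_backend_url_py (url : String) : Bool :=
  let url_lower := PySem.Str.lower url
  pvIndicatorsA.any (fun indicator => PySem.Str.isIn indicator url_lower)

-- ===== PORT B =====
def pvSlashTails : List String :=
  ["api/", "graphql", "rest/", "v1/", "v2/", "v3/",
   "supabase.co", "firebase", "execute-api", "lambda",
   "webhook", "callback", "oauth", "auth/"]

-- the for-loop of Source B: recursion over the remaining characters of the lowered URL
def pvScanB : List Char → Bool
  | [] => false
  | c :: rest =>
    if c = '/' then
      if pvSlashTails.any (fun t => PySem.Chars.startswith rest t.toList) then true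
      else pvScanB rest
    else if c = '.' then
      if PySem.Chars.startswith rest "json".toList || PySem.Chars.startswith rest "xml".toList then true
      else pvScanB rest
    else pvScanB rest

def is_backend_url_py_alt (url : String) : Bool :=
  pvScanB (PySem.Str.lower url).toList

-- ===== PRECONDITION & SPEC =====
def Spec_is_backend_url_py (url : String) (out : Bool) : Prop := out = is_backend_url_py_alt url
instance (url : String) (out : Bool) : Decidable (Spec_is_backend_url_py url out) := by unfold Spec_is_backend_url_py; infer_instance

-- ===== CLAIM (what is proved, stated in full; the proofs are below) =====
def Claim_equal_is_backend_url_py : Prop := ∀ (url : String), Dom_is_backend_url_py url → Spec_is_backend_url_py url (is_backend_url_py url)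

-- ===== LEMMAS AND PROOFS =====

lemma sw_cons (c : Char) (rest : List Char) (d : Char) (t : List Char) :
    PySem.Chars.startswith (c :: rest) (d :: t) = (decide (c = d) && PySem.Chars.startswith rest t) := by
  rw [Bool.eq_iff_iff]
  simp only [PySem.Chars.startswith_iff, List.cons_prefix_cons, Bool.and_eq_true, decide_eq_true_eq]
  constructor <;> exact fun ⟨h1, h2⟩ => ⟨h1.symm, h2⟩

-- 'sub in (c::rest)' tests a prefix at the head, then 'sub in rest'
lemma isIn_cons (sub : List Char) (c : Char) (rest : List Char) :
    PySem.Chars.isIn sub (c :: rest)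
      = (PySem.Chars.startswith (c :: rest) sub || PySem.Chars.isIn sub rest) := by
  rw [Bool.eq_iff_iff]
  simp only [Bool.or_eq_true, ← PySem.Chars.exists_prefix_drop_iff_isIn, PySem.Chars.startswith_iff]
  constructor
  · rintro ⟨j, hj⟩
    cases j with
    | zero => exact Or.inl hj
    | succ j => exact Or.inr ⟨j, hj⟩
  · rintro (h | ⟨j, hj⟩)
    · exact ⟨0, h⟩
    · exact ⟨j + 1, hj⟩

-- B's one scan step sees exactly the indicators that start at this position
lemma scan_cons (c : Char) (rest : List Char) :
    pvScanB (c :: rest)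
      = (pvIndicatorsA.any (fun ind => PySem.Chars.startswith (c :: rest) ind.toList)
          || pvScanB rest) := by
  rw [pvScanB]
  simp only [pvIndicatorsA, List.any_cons, List.any_nil,
    show ("/api/".toList : List Char) = '/' :: "api/".toList from rfl,
    show ("/graphql".toList : List Char) = '/' :: "graphql".toList from rfl,
    show ("/rest/".toList : List Char) = '/' :: "rest/".toList from rfl,
    show ("/v1/".toList : List Char) = '/' :: "v1/".toList from rfl,
    show ("/v2/".toList : List Char) = '/' :: "v2/".toList from rfl,
    show ("/v3/".toList : List Char) = '/' :: "v3/".toList from rfl,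
    show ("/supabase.co".toList : List Char) = '/' :: "supabase.co".toList from rfl,
    show ("/firebase".toList : List Char) = '/' :: "firebase".toList from rfl,
    show ("/execute-api".toList : List Char) = '/' :: "execute-api".toList from rfl,
    show ("/lambda".toList : List Char) = '/' :: "lambda".toList from rfl,
    show ("/webhook".toList : List Char) = '/' :: "webhook".toList from rfl,
    show ("/callback".toList : List Char) = '/' :: "callback".toList from rfl,
    show ("/oauth".toList : List Char) = '/' :: "oauth".toList from rfl,
    show ("/auth/".toList : List Char) = '/' :: "auth/".toList from rfl,
    show (".json".toList : List Char) = '.' :: "json".toList from rfl,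
    show (".xml".toList : List Char) = '.' :: "xml".toList from rfl,
    sw_cons]
  by_cases h : c = '/'
  · simp [h, pvSlashTails, Bool.or_assoc]
  · by_cases h2 : c = '.'
    · simp [h2, Bool.or_assoc]
    · simp [h, h2]

lemma any_or_distrib {A : Type} (L : List A) (f g : A → Bool) :
    L.any (fun x => f x || g x) = (L.any f || L.any g) := by
  induction L with
  | nil => rfl
  | cons a L ih => simp [List.any_cons, ih, Bool.or_assoc, Bool.or_left_comm]

lemma scan_eq_any_isIn (s : List Char) :
    pvScanB s = pvIndicatorsA.any (fun ind => PySem.Chars.isIn ind.toList s) := by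
  induction s with
  | nil =>
    rw [Bool.eq_iff_iff]
    simp [pvScanB, pvIndicatorsA, PySem.Chars.isIn_iff_infix, List.infix_nil]
  | cons c rest ih =>
    rw [scan_cons, ih]
    have h : ∀ ind : String, PySem.Chars.isIn ind.toList (c :: rest)
        = (PySem.Chars.startswith (c :: rest) ind.toList || PySem.Chars.isIn ind.toList rest) :=
      fun ind => isIn_cons _ _ _
    simp only [h, any_or_distrib]

-- ===== VERDICT (by name: the statement is the Claim_ definition above) =====
theorem is_backend_url_py_spec : Claim_equal_is_backend_url_py := by
  intro url _
  unfold Spec_is_backend_url_py is_backend_url_py is_backend_url_py_alt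
  simp only [PySem.Str.isIn_eq]
  exact (scan_eq_any_isIn _).symm
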